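-- pv_equiv track=rewrite | github.com/gananPrabaharan/spending-dashboard | flask_app/rule-based-named-entity-recognition/simplifications.py | sim6
-- ===== SOURCE A (Python) =====
-- def sim6(memos_list):
--     """
--     Remove punctuation
--
--     :param memos_list:
--     :return:
--     """
--     sim_list = []
--     a = ['"', ',', '.']
--     for x in range(len(memos_list)):
--         # if any of the listed punctuation is present, delete it
--         temp = ''
--         if any(i in memos_list[x] for i in a):
--             temp = memos_list[x].replace('"', "")
--             temp = temp.replace(',', "")
--         sim_list.append(temp)
--     return sim_list
-- ===== SOURCE B (Python) =====
-- def sim6(memos_list):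
--     out = []
--     for s in memos_list:
--         acc = []
--         saw = False
--         for c in s:
--             if c in '",.':
--                 saw = True
--             if c != '"' and c != ',':
--                 acc.append(c)
--         out.append(''.join(acc) if saw else '')
--     return out
-- ===== Notes on version B (the rewrite author's own statement) =====
-- stated objective: alternative
-- what changed: Replaces the any()-membership scan plus two replace() passes per string by a single fused character loop that tracks a saw-punctuation flag and accumulates kept characters in one pass.
import Mathlib
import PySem

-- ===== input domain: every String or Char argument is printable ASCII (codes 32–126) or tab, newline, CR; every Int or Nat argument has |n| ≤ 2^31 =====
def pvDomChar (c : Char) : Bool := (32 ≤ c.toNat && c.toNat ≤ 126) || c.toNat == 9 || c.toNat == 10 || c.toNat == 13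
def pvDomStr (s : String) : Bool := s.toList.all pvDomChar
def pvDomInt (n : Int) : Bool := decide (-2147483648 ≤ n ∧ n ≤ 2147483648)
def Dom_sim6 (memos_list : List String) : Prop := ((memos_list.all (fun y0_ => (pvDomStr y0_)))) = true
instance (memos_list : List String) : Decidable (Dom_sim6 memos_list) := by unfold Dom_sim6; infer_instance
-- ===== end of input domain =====

-- B fuses A's any()-scan and two replace() passes into one character loop per string (alternative single-pass decomposition, same cost).

-- ===== PORT A =====
def sim6 (memos_list : List String) : List String :=
  memos_list.foldl (fun sim_list mx =>
    let temp :=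
      if ["\"", ",", "."].any (fun i => PySem.Str.isIn i mx) then
        PySem.Str.replace (PySem.Str.replace mx "\"" "") "," ""
      else ""
    sim_list ++ [temp]) []

-- ===== PORT B =====
def sim6_alt (memos_list : List String) : List String :=
  memos_list.map (fun s =>
    let r := s.toList.foldl (fun (p : List Char × Bool) c =>
      ((if c ≠ '"' ∧ c ≠ ',' then p.1 ++ [c] else p.1),
       (if ['"', ',', '.'].contains c then true else p.2))) ([], false)
    if r.2 then String.ofList r.1 else "")

-- ===== PRECONDITION & SPEC =====
def Spec_sim6 (memos_list : List String) (out : List String) : Prop := out = sim6_alt memos_list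
instance (memos_list : List String) (out : List String) : Decidable (Spec_sim6 memos_list out) := by unfold Spec_sim6; infer_instance

-- ===== CLAIM (what is proved, stated in full; the proofs are below) =====
def Claim_equal_sim6 : Prop := ∀ (memos_list : List String), Dom_sim6 memos_list → Spec_sim6 memos_list (sim6 memos_list)

-- ===== LEMMAS AND PROOFS =====

theorem pv_infix_singleton (a : Char) (l : List Char) : [a] <:+: l ↔ a ∈ l := by
  constructor
  · intro h
    exact (List.singleton_sublist).1 h.sublist
  · intro h
    obtain ⟨pre, suf, hl⟩ := List.append_of_mem h
    exact ⟨pre, suf, by simp [hl]⟩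

theorem pv_go_single (a : Char) : ∀ (fuel : Nat) (l acc : List Char), l.length ≤ fuel →
    PySem.Chars.replace.go [a] [] fuel l acc = acc.reverse ++ l.filter (· ≠ a) := by
  intro fuel
  induction fuel with
  | zero =>
    intro l acc h
    have : l = [] := List.eq_nil_of_length_eq_zero (Nat.le_zero.1 h)
    subst this
    simp [PySem.Chars.replace.go]
  | succ n ih =>
    intro l acc h
    cases l with
    | nil => simp [PySem.Chars.replace.go]
    | cons c t =>
      by_cases hc : a = c
      · subst hc
        have h0 : [a].isPrefixOf (a :: t) = true := by simp [List.isPrefixOf]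
        simp only [PySem.Chars.replace.go, h0, if_pos]
        have hd : List.drop [a].length (a :: t) = t := rfl
        rw [hd, List.reverse_nil, List.nil_append, ih t acc (by simpa using Nat.le_of_succ_le_succ h)]
        simp
      · have h0 : [a].isPrefixOf (c :: t) = false := by
          simp [List.isPrefixOf, hc]
        simp only [PySem.Chars.replace.go, h0]
        rw [if_neg (by simp [hc]), ih t (c :: acc) (by simpa using Nat.le_of_succ_le_succ h)]
        simp [Ne.symm hc]

theorem pv_replace_single (a : Char) (cs : List Char) :
    PySem.Chars.replace cs [a] [] = cs.filter (· ≠ a) := by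
  rw [PySem.Chars.replace, if_neg (by simp)]
  simpa using pv_go_single a cs.length cs [] (le_refl _)

theorem pv_fold_char (cs : List Char) (acc : List Char) (saw : Bool) :
    cs.foldl (fun (p : List Char × Bool) c =>
      ((if c ≠ '"' ∧ c ≠ ',' then p.1 ++ [c] else p.1),
       (if ['"', ',', '.'].contains c then true else p.2))) (acc, saw)
    = (acc ++ cs.filter (fun c => c ≠ '"' ∧ c ≠ ','),
       saw || cs.any (fun c => ['"', ',', '.'].contains c)) := by
  induction cs generalizing acc saw with
  | nil => simp
  | cons c t ih =>
    simp only [List.foldl_cons, List.filter_cons, List.any_cons, ih]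
    by_cases h1 : c = '"' <;> by_cases h2 : c = ',' <;>
      simp [h1, h2, Bool.or_assoc] <;> by_cases h3 : c = '.' <;> simp [h3, Bool.or_assoc]

theorem pv_perstring (s : String) :
    (if ["\"", ",", "."].any (fun i => PySem.Str.isIn i s) then
        PySem.Str.replace (PySem.Str.replace s "\"" "") "," ""
      else "")
    = (let r := s.toList.foldl (fun (p : List Char × Bool) c =>
        ((if c ≠ '"' ∧ c ≠ ',' then p.1 ++ [c] else p.1),
         (if ['"', ',', '.'].contains c then true else p.2))) ([], false)
      if r.2 then String.ofList r.1 else "") := by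
  simp only [pv_fold_char s.toList [] false, Bool.false_or, List.nil_append]
  have hcond : (["\"", ",", "."].any (fun i => PySem.Str.isIn i s))
      = s.toList.any (fun c => ['"', ',', '.'].contains c) := by
    simp only [List.any_cons, List.any_nil, Bool.or_false]
    have h1 : ∀ (a : Char) (str : String), str.toList = [a] →
        PySem.Str.isIn str s = s.toList.contains a := by
      intro a str hstr
      have hiff := PySem.Str.isIn_iff_infix str s
      rw [hstr, pv_infix_singleton] at hiff
      by_cases hm : a ∈ s.toList
      · rw [hiff.2 hm]; simp [hm]
      · rcases hb : PySem.Str.isIn str s with _ | _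
        · simp [hm]
        · exact absurd (hiff.1 hb) hm
    rw [h1 '"' "\"" (by decide), h1 ',' "," (by decide), h1 '.' "." (by decide)]
    rw [Bool.eq_iff_iff]
    simp [List.any_eq_true]
    constructor
    · rintro (h | h | h)
      · exact ⟨_, h, Or.inl rfl⟩
      · exact ⟨_, h, Or.inr (Or.inl rfl)⟩
      · exact ⟨_, h, Or.inr (Or.inr rfl)⟩
    · rintro ⟨x, hx, rfl | rfl | rfl⟩ <;> tauto
  rw [hcond]
  cases h : s.toList.any (fun c => ['"', ',', '.'].contains c) with
  | false => simp
  | true =>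
    rw [if_pos rfl, if_pos rfl]
    apply String.toList_injective
    have hrep : (PySem.Str.replace (PySem.Str.replace s "\"" "") "," "").toList
        = (s.toList.filter (· ≠ '"')).filter (· ≠ ',') := by
      simp only [PySem.Str.toList_replace]
      rw [show ("\"" : String).toList = ['"'] from rfl, show ("," : String).toList = [','] from rfl,
        show ("" : String).toList = [] from rfl, pv_replace_single, pv_replace_single]
    have hmk : ∀ (l : List Char), (String.ofList l).toList = l := fun l => by simp
    rw [hrep, hmk, List.filter_filter]
    simp only [Bool.decide_and, decide_not]
    apply List.filter_congr
    intro x _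
    simp [Bool.and_comm]

-- ===== VERDICT (by name: the statement is the Claim_ definition above) =====
theorem sim6_spec : Claim_equal_sim6 := by
  intro memos_list hdom
  clear hdom
  unfold Spec_sim6 sim6 sim6_alt
  induction memos_list using List.reverseRecOn with
  | nil => simp
  | append_singleton t s ih =>
    rw [List.foldl_append, List.map_append, ih]
    simp only [List.foldl_cons, List.foldl_nil, List.map_cons, List.map_nil]
    rw [pv_perstring s]
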